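-- pv_equiv track=rewrite | github.com/clemneo/aoc21 | day04.py | has_diagonal_bingo
-- ===== SOURCE A (Python) =====
-- def has_diagonal_bingo(grid, drawn_nos):
--   grid_size = len(grid)
--   i = j = 0
--   while i < grid_size:
--     if not grid[i][j] in drawn_nos:
--       break
--     if i == grid_size-1:
--       return True
--     i += 1
--     j += 1
--   i = 0
--   j = grid_size-1
--   while i < grid_size:
--     if not grid[i][j] in drawn_nos:
--       break
--     if i == grid_size-1:
--       return True
--     i += 1
--     j -= 1
--   return False
-- ===== SOURCE B (Python) =====
-- def has_diagonal_bingo(grid, drawn_nos):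
--     if not grid:
--         return False
--     last = len(grid) - 1
--
--     def walk(rows, j):
--         # recursively computes, for the row suffix `rows` starting at diagonal
--         # index j, whether the rest of the main/anti diagonal is fully drawn
--         if not rows:
--             return (True, True)
--         m, a = walk(rows[1:], j + 1)
--         row = rows[0]
--         return (m and row[j] in drawn_nos, a and row[last - j] in drawn_nos)
--
--     m, a = walk(grid, 0)
--     return m or a
-- ===== Notes on version B (the rewrite author's own statement) =====
-- stated objective: alternative
-- what changed: Replaces A's two sequential early-exit index-driven while loops with one structural recursion over the list of rows that returns a pair (main-diagonal ok, anti-diagonal ok) for each row suffix, combined at the top with or.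
-- outside the precondition, e.g. on has_diagonal_bingo([[5, 1], [2]], set()): A returns False, B raises IndexError
import Mathlib
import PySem

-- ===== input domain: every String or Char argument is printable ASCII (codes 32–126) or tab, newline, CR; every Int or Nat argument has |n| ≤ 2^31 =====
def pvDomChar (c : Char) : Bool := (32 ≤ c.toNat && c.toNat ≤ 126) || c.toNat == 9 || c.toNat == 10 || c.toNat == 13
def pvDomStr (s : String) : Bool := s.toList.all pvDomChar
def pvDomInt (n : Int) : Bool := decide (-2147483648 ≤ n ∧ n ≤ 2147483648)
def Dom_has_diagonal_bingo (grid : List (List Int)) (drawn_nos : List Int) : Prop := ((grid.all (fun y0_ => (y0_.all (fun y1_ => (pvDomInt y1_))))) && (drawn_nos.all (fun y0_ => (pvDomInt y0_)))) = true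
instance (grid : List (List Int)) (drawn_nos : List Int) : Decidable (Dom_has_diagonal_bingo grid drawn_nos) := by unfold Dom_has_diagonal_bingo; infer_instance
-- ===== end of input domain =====

-- B replaces A's two sequential early-exit index-driven while loops with one
-- structural recursion over the list of rows returning a pair of diagonal flags;
-- objective: alternative decomposition.

-- shared indexing helper: Python's row[j]; inside Pre_ all accessed indices are
-- in range, so the .getD default is never the value used.
def pvCell (row : List Int) (j : Int) : Int :=
  (PySem.List.pyGet? row j).getD 0

-- ===== PORT A =====
-- Python's grid[i]
def pvRow (grid : List (List Int)) (i : Int) : List Int :=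
  (PySem.List.pyGet? grid i).getD []

-- first while loop: i from 0, j = i (both incremented together)
def pvLoopMain (grid : List (List Int)) (drawn_nos : List Int) (n i : Nat) (j : Int) : Bool :=
  if i < n then
    if ¬ (pvCell (pvRow grid i) j ∈ drawn_nos) then false  -- break → fall through
    else if i = n - 1 then true
    else pvLoopMain grid drawn_nos n (i+1) (j+1)
  else false
termination_by n - i

-- second while loop: i from 0, j from n-1 downwards
def pvLoopAnti (grid : List (List Int)) (drawn_nos : List Int) (n i : Nat) (j : Int) : Bool :=
  if i < n then
    if ¬ (pvCell (pvRow grid i) j ∈ drawn_nos) then false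
    else if i = n - 1 then true
    else pvLoopAnti grid drawn_nos n (i+1) (j-1)
  else false
termination_by n - i

def has_diagonal_bingo (grid : List (List Int)) (drawn_nos : List Int) : Bool :=
  if pvLoopMain grid drawn_nos grid.length 0 0 then true
  else if pvLoopAnti grid drawn_nos grid.length 0 ((grid.length : Int) - 1) then true
  else false

-- ===== PORT B =====
-- Source B's inner `walk(rows, j)`: structural recursion on the row-suffix list
def pvWalk (drawn_nos : List Int) (last : Int) : List (List Int) → Int → Bool × Bool
  | [], _ => (true, true)
  | row :: rest, j =>
    let p := pvWalk drawn_nos last rest (j + 1)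
    (p.1 && drawn_nos.contains (pvCell row j),
     p.2 && drawn_nos.contains (pvCell row (last - j)))

def has_diagonal_bingo_alt (grid : List (List Int)) (drawn_nos : List Int) : Bool :=
  if grid = [] then false
  else
    let p := pvWalk drawn_nos ((grid.length : Int) - 1) grid 0
    p.1 || p.2

-- ===== PRECONDITION & SPEC =====
-- Pre_ excludes ragged grids (some row shorter than the grid): the natural bingo
-- domain is a square grid; on rows shorter than len(grid) A raises IndexError
-- unless an earlier diagonal miss breaks the loop first (in which case A returns
-- a value but B raises).
def Pre_has_diagonal_bingo (grid : List (List Int)) (drawn_nos : List Int) : Prop :=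
  ∀ row ∈ grid, grid.length ≤ row.length

instance (grid : List (List Int)) (drawn_nos : List Int) : Decidable (Pre_has_diagonal_bingo grid drawn_nos) := by
  unfold Pre_has_diagonal_bingo; infer_instance

def pvWitness_has_diagonal_bingo : List (List Int) × List Int := ([[1, 2], [3, 4]], [1, 4, 2])

def Spec_has_diagonal_bingo (grid : List (List Int)) (drawn_nos : List Int) (out : Bool) : Prop := out = has_diagonal_bingo_alt grid drawn_nos
instance (grid : List (List Int)) (drawn_nos : List Int) (out : Bool) : Decidable (Spec_has_diagonal_bingo grid drawn_nos out) := by unfold Spec_has_diagonal_bingo; infer_instance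

-- ===== CLAIM (what is proved, stated in full; the proofs are below) =====
def Claim_equal_has_diagonal_bingo : Prop := ∀ (grid : List (List Int)) (drawn_nos : List Int), Dom_has_diagonal_bingo grid drawn_nos → Pre_has_diagonal_bingo grid drawn_nos → Spec_has_diagonal_bingo grid drawn_nos (has_diagonal_bingo grid drawn_nos)

-- ===== LEMMAS AND PROOFS =====

-- characterisation of A's first loop (always called with j = i)
theorem pvLoopMain_char (grid : List (List Int)) (drawn_nos : List Int) (n : Nat) :
    ∀ i : Nat, pvLoopMain grid drawn_nos n i i =
      decide (i < n ∧ ∀ k, i ≤ k → k < n → pvCell (pvRow grid k) k ∈ drawn_nos) := by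
  have key : ∀ d i, n - i ≤ d → pvLoopMain grid drawn_nos n i i =
      decide (i < n ∧ ∀ k, i ≤ k → k < n → pvCell (pvRow grid k) k ∈ drawn_nos) := by
    intro d
    induction d with
    | zero =>
      intro i h
      have hin : ¬ i < n := by omega
      rw [pvLoopMain]
      simp [hin]
    | succ d ih =>
      intro i h
      rw [pvLoopMain]
      by_cases hin : i < n
      · by_cases hmem : pvCell (pvRow grid i) (i : Int) ∈ drawn_nos
        · by_cases hlast : i = n - 1
          · simp only [if_pos hin, if_neg (not_not_intro hmem), if_pos hlast]
            symm
            rw [decide_eq_true_eq]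
            refine ⟨hin, ?_⟩
            intro k hk1 hk2
            have : k = i := by omega
            subst this; exact hmem
          · have hrec : (i : Int) + 1 = ((i + 1 : Nat) : Int) := by push_cast; ring
            simp only [if_pos hin, if_neg (not_not_intro hmem), if_neg hlast, hrec]
            rw [ih (i + 1) (by omega)]
            rw [decide_eq_decide]
            constructor
            · rintro ⟨h1, h2⟩
              refine ⟨hin, ?_⟩
              intro k hk1 hk2
              rcases Nat.eq_or_lt_of_le hk1 with rfl | hk
              · exact hmem
              · exact h2 k hk hk2
            · rintro ⟨h1, h2⟩
              exact ⟨by omega, fun k hk1 hk2 => h2 k (by omega) hk2⟩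
        · rw [if_pos hin, if_pos hmem]
          symm
          rw [decide_eq_false_iff_not]
          rintro ⟨h1, h2⟩
          exact hmem (h2 i le_rfl hin)
      · simp [hin]
  intro i
  exact key (n - i) i le_rfl

-- characterisation of A's second loop (always called with j = n - 1 - i)
theorem pvLoopAnti_char (grid : List (List Int)) (drawn_nos : List Int) (n : Nat) :
    ∀ i : Nat, pvLoopAnti grid drawn_nos n i ((n : Int) - 1 - i) =
      decide (i < n ∧ ∀ k, i ≤ k → k < n →
        pvCell (pvRow grid k) ((n : Int) - 1 - k) ∈ drawn_nos) := by
  have key : ∀ d i, n - i ≤ d → pvLoopAnti grid drawn_nos n i ((n : Int) - 1 - i) =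
      decide (i < n ∧ ∀ k, i ≤ k → k < n →
        pvCell (pvRow grid k) ((n : Int) - 1 - k) ∈ drawn_nos) := by
    intro d
    induction d with
    | zero =>
      intro i h
      have hin : ¬ i < n := by omega
      rw [pvLoopAnti]
      simp [hin]
    | succ d ih =>
      intro i h
      rw [pvLoopAnti]
      by_cases hin : i < n
      · by_cases hmem : pvCell (pvRow grid i) ((n : Int) - 1 - i) ∈ drawn_nos
        · by_cases hlast : i = n - 1
          · simp only [if_pos hin, if_neg (not_not_intro hmem), if_pos hlast]
            symm
            rw [decide_eq_true_eq]
            refine ⟨hin, ?_⟩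
            intro k hk1 hk2
            have : k = i := by omega
            subst this; exact hmem
          · have hrec : (n : Int) - 1 - i - 1 = (n : Int) - 1 - ((i + 1 : Nat) : Int) := by
              push_cast; ring
            simp only [if_pos hin, if_neg (not_not_intro hmem), if_neg hlast, hrec]
            rw [ih (i + 1) (by omega)]
            rw [decide_eq_decide]
            constructor
            · rintro ⟨h1, h2⟩
              refine ⟨hin, ?_⟩
              intro k hk1 hk2
              rcases Nat.eq_or_lt_of_le hk1 with rfl | hk
              · exact hmem
              · exact h2 k hk hk2
            · rintro ⟨h1, h2⟩
              exact ⟨by omega, fun k hk1 hk2 => h2 k (by omega) hk2⟩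
        · rw [if_pos hin, if_pos hmem]
          symm
          rw [decide_eq_false_iff_not]
          rintro ⟨h1, h2⟩
          exact hmem (h2 i le_rfl hin)
      · simp [hin]
  intro i
  exact key (n - i) i le_rfl

-- characterisation of B's recursive walk over a row suffix
theorem pvWalk_char (drawn_nos : List Int) (last : Int) :
    ∀ (rows : List (List Int)) (j : Int), pvWalk drawn_nos last rows j =
      (decide (∀ k, k < rows.length → pvCell (rows.getD k []) (j + k) ∈ drawn_nos),
       decide (∀ k, k < rows.length → pvCell (rows.getD k []) (last - (j + k)) ∈ drawn_nos)) := by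
  intro rows
  induction rows with
  | nil => intro j; simp [pvWalk]
  | cons row rest ih =>
    intro j
    rw [pvWalk, ih (j + 1)]
    have hc : ∀ x : Int, drawn_nos.contains x = decide (x ∈ drawn_nos) := by
      intro x; simp [List.contains_iff_mem]
    simp only [Prod.mk.injEq]
    constructor
    · rw [Bool.and_comm, hc, ← Bool.decide_and, decide_eq_decide]
      constructor
      · rintro ⟨h0, hrest⟩ k hk
        cases k with
        | zero => simpa using h0
        | succ m =>
          have hcast : j + ((m + 1 : Nat) : Int) = j + 1 + m := by push_cast; ring
          rw [List.getD_cons_succ, hcast]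
          exact hrest m (by simpa using hk)
      · intro h
        refine ⟨by simpa using h 0 (by simp), fun k hk => ?_⟩
        have hcast : j + 1 + (k : Int) = j + ((k + 1 : Nat) : Int) := by push_cast; ring
        rw [hcast]
        have := h (k + 1) (by simpa using Nat.succ_lt_succ hk)
        simpa using this
    · rw [Bool.and_comm, hc, ← Bool.decide_and, decide_eq_decide]
      constructor
      · rintro ⟨h0, hrest⟩ k hk
        cases k with
        | zero => simpa using h0
        | succ m =>
          have hcast : last - (j + ((m + 1 : Nat) : Int)) = last - (j + 1 + m) := by push_cast; ring
          rw [List.getD_cons_succ, hcast]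
          exact hrest m (by simpa using hk)
      · intro h
        refine ⟨by simpa using h 0 (by simp), fun k hk => ?_⟩
        have hcast : last - (j + 1 + (k : Int)) = last - (j + ((k + 1 : Nat) : Int)) := by push_cast; ring
        rw [hcast]
        have := h (k + 1) (by simpa using Nat.succ_lt_succ hk)
        simpa using this

-- ===== VERDICT (by name: the statement is the Claim_ definition above) =====
theorem has_diagonal_bingo_spec : Claim_equal_has_diagonal_bingo := by
  intro grid drawn_nos _ _
  unfold Spec_has_diagonal_bingo has_diagonal_bingo has_diagonal_bingo_alt
  have hA := pvLoopMain_char grid drawn_nos grid.length 0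
  have hB := pvLoopAnti_char grid drawn_nos grid.length 0
  push_cast at hA hB
  simp only [Int.sub_zero] at hB
  rw [hA, hB, pvWalk_char]
  by_cases hn : grid = []
  · simp [hn]
  · have hlen : grid.length ≠ 0 := by simpa using fun h => hn (List.length_eq_zero_iff.mp h)
    have hpos : 0 < grid.length := Nat.pos_of_ne_zero hlen
    simp only [if_neg hn]
    have hrow : ∀ k, k < grid.length → pvRow grid (k : Int) = grid.getD k [] := by
      intro k hk
      simp [pvRow, PySem.List.pyGet?, PySem.List.pyIdx?, hk, List.getD]
    rw [Bool.eq_iff_iff]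
    simp only [Bool.or_eq_true, decide_eq_true_eq, Bool.if_true_left]
    constructor
    · rintro (⟨_, h⟩ | ⟨_, h⟩ | hF)
      · exact Or.inl fun k hk => by rw [← hrow k hk, zero_add] at *; exact (by simpa using h k (Nat.zero_le k) hk)
      · exact Or.inr fun k hk => by rw [← hrow k hk]; simpa using h k (Nat.zero_le k) hk
      · exact absurd hF (by simp)
    · rintro (h | h)
      · exact Or.inl ⟨hpos, fun k _ hk => by have := h k hk; rw [hrow k hk]; simpa using this⟩
      · exact Or.inr (Or.inl ⟨hpos, fun k _ hk => by have := h k hk; rw [hrow k hk]; simpa using this⟩)
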